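-- pv_equiv track=rewrite | github.com/deepmancer/HairPort | hairport/metrics/latex_builder.py | get_ordered_methods
-- ===== SOURCE A (Python) =====
-- from typing import Dict, List, Optional, Tuple, Any
--
-- HAIRPORT_METHOD_PREFIX = 'hairport'
--
-- def is_hairport_method(method: str) -> bool:
--     """
--     Check if a method is a HairPort variant.
--
--     All methods starting with 'hairport' are considered HairPort variants:
--     - hairport
--     - hairport_hi3dgen
--     - hairport_direct3d_s2
--     - etc.
--     """
--     return method.startswith(HAIRPORT_METHOD_PREFIX)
--
-- METHOD_ORDER = [
--     'barbershop',
--     'styleyourhair',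
--     'hairclip',
--     'hairclipv2',
--     'hairfastgan',
--     'stablehair',
--     'hairfusion',
--     # HairPort variants (will be sorted and added dynamically)
-- ]
--
-- def get_ordered_methods(methods: List[str], our_method: str = "hairport") -> List[str]:
--     """
--     Sort methods according to METHOD_ORDER, with all HairPort variants at the end.
--
--     Baselines are sorted according to METHOD_ORDER, then alphabetically for unknown ones.
--     All HairPort variants (methods starting with 'hairport') are placed at the end,
--     sorted alphabetically among themselves.
--
--     Args:
--         methods: List of method names to sort
--         our_method: Deprecated parameter, kept for backward compatibility.
--             All hairport variants are now automatically placed at the end.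
--
--     Returns:
--         Sorted list of methods with HairPort variants at the end
--     """
--     # Create ordering dict from METHOD_ORDER
--     order_dict = {m: i for i, m in enumerate(METHOD_ORDER)}
--
--     # Separate HairPort variants from baselines
--     hairport_methods = [m for m in methods if is_hairport_method(m)]
--     baseline_methods = [m for m in methods if not is_hairport_method(m)]
--
--     # Sort baseline methods: first by METHOD_ORDER position, then alphabetically for unknown ones
--     def baseline_sort_key(m):
--         if m in order_dict:
--             return (0, order_dict[m], m)  # Known methods: sort by position
--         return (1, 0, m)  # Unknown methods: alphabetically after known ones
--
--     sorted_baselines = sorted(baseline_methods, key=baseline_sort_key)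
--
--     # Sort HairPort variants alphabetically
--     sorted_hairport = sorted(hairport_methods)
--
--     # Combine: baselines first, then HairPort variants
--     return sorted_baselines + sorted_hairport
-- ===== SOURCE B (Python) =====
-- HAIRPORT_METHOD_PREFIX = 'hairport'
--
-- METHOD_ORDER = [
--     'barbershop',
--     'styleyourhair',
--     'hairclip',
--     'hairclipv2',
--     'hairfastgan',
--     'stablehair',
--     'hairfusion',
-- ]
--
-- def get_ordered_methods(methods, our_method="hairport"):
--     """Single sorted() pass: rank 0-6 = METHOD_ORDER position, 7 = unknown
--     baseline, 8 = hairport variant; ties broken alphabetically by name."""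
--     order_dict = {m: i for i, m in enumerate(METHOD_ORDER)}
--
--     def rank(m):
--         return 8 if m.startswith(HAIRPORT_METHOD_PREFIX) else order_dict.get(m, 7)
--
--     return sorted(methods, key=lambda m: (rank(m), m))
-- ===== Notes on version B (the rewrite author's own statement) =====
-- stated objective: simpler
-- what changed: Replaced the partition-into-two-lists + two separate sorts + concatenation with one sorted() call over the whole list using a composite key (rank, name), where rank is 0-6 for METHOD_ORDER baselines, 7 for unknown baselines, 8 for hairport variants.
import Mathlib
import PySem

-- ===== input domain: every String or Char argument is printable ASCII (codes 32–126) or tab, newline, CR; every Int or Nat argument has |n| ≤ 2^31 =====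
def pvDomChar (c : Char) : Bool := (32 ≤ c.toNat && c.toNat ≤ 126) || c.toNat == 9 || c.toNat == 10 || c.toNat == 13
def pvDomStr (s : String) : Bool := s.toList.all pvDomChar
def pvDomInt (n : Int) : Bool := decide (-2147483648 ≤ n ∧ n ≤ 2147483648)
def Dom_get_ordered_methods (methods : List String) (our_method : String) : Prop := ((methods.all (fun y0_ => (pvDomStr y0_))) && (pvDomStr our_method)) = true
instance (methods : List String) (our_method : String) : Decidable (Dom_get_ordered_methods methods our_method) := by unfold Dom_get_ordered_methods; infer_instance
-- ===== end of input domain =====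

-- B replaces A's partition + two separate sorts + concatenation by a single stable sort of the
-- whole list under the composite key (rank m, m); same return value; 'our_method' is unused (as in the Python).

-- shared module constants (both Source A and Source B define/use them)
def HAIRPORT_METHOD_PREFIX : String := "hairport"

def METHOD_ORDER : List String :=
  ["barbershop", "styleyourhair", "hairclip", "hairclipv2", "hairfastgan", "stablehair", "hairfusion"]

-- ===== PORT A =====
def is_hairport_method (method : String) : Bool :=
  PySem.Str.startswith method HAIRPORT_METHOD_PREFIX

-- Python's baseline keys (0, order_dict[m], m) and (1, 0, m): the known positions are 0..6 < 7, so
-- comparing those lexicographic 3-tuples is EXACTLY comparing the pair (this flattened key, m);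
-- PySem.List.sorted2 is the pair-key sort.
def baseline_sort_key_flat (order_dict : PySem.Dict String Int) (m : String) : Int :=
  match order_dict.get? m with
  | some i => i        -- m in order_dict: (0, order_dict[m], m)
  | none => 7          -- unknown: (1, 0, m)

def get_ordered_methods (methods : List String) (our_method : String) : List String :=
  let order_dict : PySem.Dict String Int :=
    (PySem.List.enumerate METHOD_ORDER).foldl (fun d p => d.insert p.2 p.1) PySem.Dict.empty
  let hairport_methods := methods.filter (fun m => is_hairport_method m)
  let baseline_methods := methods.filter (fun m => !is_hairport_method m)
  let sorted_baselines :=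
    PySem.List.sorted2 baseline_methods (fun m => baseline_sort_key_flat order_dict m) (fun m => m)
  let sorted_hairport := PySem.List.sorted hairport_methods (fun m => m)
  sorted_baselines ++ sorted_hairport

-- ===== PORT B =====
def rank_alt (order_dict : PySem.Dict String Int) (m : String) : Int :=
  if PySem.Str.startswith m HAIRPORT_METHOD_PREFIX then 8 else order_dict.getD m 7

def get_ordered_methods_alt (methods : List String) (our_method : String) : List String :=
  let order_dict : PySem.Dict String Int :=
    (PySem.List.enumerate METHOD_ORDER).foldl (fun d p => d.insert p.2 p.1) PySem.Dict.empty
  PySem.List.sorted2 methods (fun m => rank_alt order_dict m) (fun m => m)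

-- ===== PRECONDITION & SPEC =====
def Spec_get_ordered_methods (methods : List String) (our_method : String) (out : List String) : Prop := out = get_ordered_methods_alt methods our_method
instance (methods : List String) (our_method : String) (out : List String) : Decidable (Spec_get_ordered_methods methods our_method out) := by unfold Spec_get_ordered_methods; infer_instance

-- ===== CLAIM (what is proved, stated in full; the proofs are below) =====
def Claim_equal_get_ordered_methods : Prop := ∀ (methods : List String) (our_method : String), Dom_get_ordered_methods methods our_method → Spec_get_ordered_methods methods our_method (get_ordered_methods methods our_method)

-- ===== LEMMAS AND PROOFS =====

-- proof-side names for the pieces both ports share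
def pvOd : PySem.Dict String Int :=
  (PySem.List.enumerate METHOD_ORDER).foldl (fun d p => d.insert p.2 p.1) PySem.Dict.empty

def pvHp (m : String) : Bool := PySem.Str.startswith m HAIRPORT_METHOD_PREFIX

def pvK1A (m : String) : Int := baseline_sort_key_flat pvOd m

def pvRank (m : String) : Int := rank_alt pvOd m

-- embed a pair key (i, m) with 0 ≤ i ≤ 8 into a single String key: one prefix char, then m
def pvPC (i : Int) : Char := Char.ofNat (48 + i.toNat)

def pvK (f : String → Int) (m : String) : String := String.ofList (pvPC (f m) :: m.toList)

lemma pvOd_lit : pvOd = PySem.Dict.mk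
    [("barbershop", 0), ("styleyourhair", 1), ("hairclip", 2), ("hairclipv2", 3),
     ("hairfastgan", 4), ("stablehair", 5), ("hairfusion", 6)] := by decide

lemma pvK1A_bounds (m : String) : 0 ≤ pvK1A m ∧ pvK1A m ≤ 7 := by
  unfold pvK1A baseline_sort_key_flat
  rw [pvOd_lit]
  simp only [PySem.Dict.get?_mk_cons]
  split_ifs <;> simp [PySem.Dict.get?]

lemma pvRank_eq (m : String) : pvRank m = if pvHp m then 8 else pvK1A m := by
  unfold pvRank rank_alt pvHp pvK1A baseline_sort_key_flat
  rw [PySem.Dict.getD_eq_get?_getD]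
  cases pvOd.get? m <;> simp

lemma pvRank_bounds (m : String) : 0 ≤ pvRank m ∧ pvRank m ≤ 8 := by
  have h := pvK1A_bounds m
  rw [pvRank_eq]
  split_ifs <;> omega

lemma pvPC_lt_iff {i j : Int} (hi0 : 0 ≤ i) (hi : i ≤ 8) (hj0 : 0 ≤ j) (hj : j ≤ 8) :
    pvPC i < pvPC j ↔ i < j := by
  interval_cases i <;> interval_cases j <;> decide

lemma pvPC_eq_iff {i j : Int} (hi0 : 0 ≤ i) (hi : i ≤ 8) (hj0 : 0 ≤ j) (hj : j ≤ 8) :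
    pvPC i = pvPC j ↔ i = j := by
  interval_cases i <;> interval_cases j <;> decide

lemma pvK_lt_iff (f : String → Int) (hf : ∀ m, 0 ≤ f m ∧ f m ≤ 8) (a b : String) :
    pvK f a < pvK f b ↔ (f a < f b ∨ (f a = f b ∧ a < b)) := by
  obtain ⟨ha0, ha8⟩ := hf a
  obtain ⟨hb0, hb8⟩ := hf b
  unfold pvK
  rw [String.lt_iff_toList_lt, String.toList_ofList, String.toList_ofList,
      List.cons_lt_cons_iff, pvPC_lt_iff ha0 ha8 hb0 hb8, pvPC_eq_iff ha0 ha8 hb0 hb8,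
      ← String.lt_iff_toList_lt]

lemma pvK_inj (f : String → Int) : Function.Injective (pvK f) := by
  intro a b h
  unfold pvK at h
  have h2 := congrArg String.toList h
  rw [String.toList_ofList, String.toList_ofList] at h2
  have h3 : a.toList = b.toList := by injection h2
  calc a = String.ofList a.toList := by rw [String.ofList_toList]
    _ = String.ofList b.toList := by rw [h3]
    _ = b := by rw [String.ofList_toList]

lemma pvBefore_eq (f : String → Int) (hf : ∀ m, 0 ≤ f m ∧ f m ≤ 8) :
    (fun a b : String => decide (f a < f b) || (!decide (f b < f a) && decide (a < b)))
      = (fun a b : String => decide (pvK f a < pvK f b)) := by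
  funext a b
  rw [show (decide (pvK f a < pvK f b)) = decide (f a < f b ∨ (f a = f b ∧ a < b)) from
        decide_eq_decide.mpr (pvK_lt_iff f hf a b)]
  rcases lt_trichotomy (f a) (f b) with h | h | h
  · simp [h]
  · simp [h]
  · simp only [h.not_gt, h.ne', false_and, or_false, decide_false, Bool.false_or]
    simp [h]

-- a sort with the pair key (f m, m) IS the sort with the single String key pvK f
lemma pvSorted2_eq (f : String → Int) (hf : ∀ m, 0 ≤ f m ∧ f m ≤ 8) (xs : List String) :
    PySem.List.sorted2 xs f (fun m => m) = PySem.List.sorted xs (pvK f) := by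
  rw [PySem.List.sorted_eq_foldl_insertBy]
  show xs.foldl (fun acc x => PySem.List.insertBy
      (fun a b => decide (f a < f b) || (!decide (f b < f a) && decide (a < b))) x acc) [] = _
  rw [pvBefore_eq f hf]

lemma pvK1A_bounds8 (m : String) : 0 ≤ pvK1A m ∧ pvK1A m ≤ 8 := by
  have := pvK1A_bounds m; omega

lemma pvA_eq (methods : List String) (our_method : String) :
    get_ordered_methods methods our_method =
      PySem.List.sorted (methods.filter (fun m => !pvHp m)) (pvK pvK1A) ++
      PySem.List.sorted (methods.filter (fun m => pvHp m)) (fun m => m) := by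
  show PySem.List.sorted2 (methods.filter (fun m => !pvHp m)) pvK1A (fun m => m) ++
      PySem.List.sorted (methods.filter (fun m => pvHp m)) (fun m => m) = _
  rw [pvSorted2_eq pvK1A pvK1A_bounds8]

lemma pvB_eq (methods : List String) (our_method : String) :
    get_ordered_methods_alt methods our_method = PySem.List.sorted methods (pvK pvRank) := by
  show PySem.List.sorted2 methods pvRank (fun m => m) = _
  rw [pvSorted2_eq pvRank pvRank_bounds]

-- A's output is pairwise-sorted under B's key pvK pvRank
lemma pvA_pairwise (methods : List String) (our_method : String) :
    (get_ordered_methods methods our_method).Pairwise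
      (fun a b => pvK pvRank a ≤ pvK pvRank b) := by
  rw [pvA_eq]
  rw [List.pairwise_append]
  refine ⟨?_, ?_, ?_⟩
  · -- baselines: pvK1A agrees with pvRank on non-hairport members
    have hpw := PySem.List.sorted_pairwise (methods.filter (fun m => !pvHp m)) (pvK pvK1A)
    refine hpw.imp_of_mem (fun {a b} ha hb hab => ?_)
    rw [PySem.List.mem_sorted, List.mem_filter] at ha hb
    have hfa : pvHp a = false := by simpa using ha.2
    have hfb : pvHp b = false := by simpa using hb.2
    have hka : pvK pvRank a = pvK pvK1A a := by
      unfold pvK; rw [pvRank_eq]; simp [hfa]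
    have hkb : pvK pvRank b = pvK pvK1A b := by
      unfold pvK; rw [pvRank_eq]; simp [hfb]
    rw [hka, hkb]; exact hab
  · -- hairport variants: rank is constantly 8, so alphabetical order is pvK-order
    have hpw := PySem.List.sorted_pairwise (methods.filter (fun m => pvHp m)) (fun m => m)
    refine hpw.imp_of_mem (fun {a b} ha hb hab => ?_)
    rw [PySem.List.mem_sorted, List.mem_filter] at ha hb
    have hra : pvRank a = 8 := by rw [pvRank_eq]; simp [ha.2]
    have hrb : pvRank b = 8 := by rw [pvRank_eq]; simp [hb.2]
    rcases lt_or_eq_of_le hab with h | h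
    · exact le_of_lt ((pvK_lt_iff pvRank pvRank_bounds a b).mpr (Or.inr ⟨by rw [hra, hrb], h⟩))
    · rw [h]
  · -- every baseline key precedes every hairport key (rank ≤ 7 < 8)
    intro a ha b hb
    rw [PySem.List.mem_sorted, List.mem_filter] at ha hb
    have hfa : pvHp a = false := by simpa using ha.2
    have hra : pvRank a = pvK1A a := by
      rw [pvRank_eq]; simp [hfa]
    have hrb : pvRank b = 8 := by rw [pvRank_eq]; simp [hb.2]
    have h7 := pvK1A_bounds a
    exact le_of_lt ((pvK_lt_iff pvRank pvRank_bounds a b).mpr (Or.inl (by omega)))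

lemma pvA_perm (methods : List String) (our_method : String) :
    (get_ordered_methods methods our_method).Perm methods := by
  rw [pvA_eq]
  refine List.Perm.trans
    (List.Perm.append (PySem.List.sorted_perm _ _ _) (PySem.List.sorted_perm _ _ _)) ?_
  have h := List.filter_append_perm (fun m => !pvHp m) methods
  simpa using h

-- ===== VERDICT (by name: the statement is the Claim_ definition above) =====
theorem get_ordered_methods_spec : Claim_equal_get_ordered_methods := by
  intro methods our_method _
  unfold Spec_get_ordered_methods
  apply PySem.List.eq_of_perm_of_pairwise_le_of_injective (pvK pvRank) (pvK_inj pvRank)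
  · exact (pvA_perm methods our_method).trans
      ((pvB_eq methods our_method ▸ PySem.List.sorted_perm methods (pvK pvRank) false).symm)
  · exact pvA_pairwise methods our_method
  · rw [pvB_eq]; exact PySem.List.sorted_pairwise methods (pvK pvRank)
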